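-- pv_equiv track=rewrite | github.com/Khalid7466/receipt-ocr | src/parsing/extractor.py | fix_ocr_number_errors
-- ===== SOURCE A (Python) =====
-- def fix_ocr_number_errors(text: str) -> str:
--     """
--     Fix common OCR errors where letters are misread as digits or vice versa.
--
--     Common OCR mistakes:
--     - 'O' or 'o' → '0'
--     - 'l' or 'I' → '1'
--     - 'S' or 's' → '5'
--     - 'B' → '8'
--     - 'Z' → '2'
--
--     Args:
--         text: Raw OCR text that should be a number
--
--     Returns:
--         Corrected text with letter-to-digit substitutions
--     """
--     corrections = {
--         'O': '0', 'o': '0',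
--         'l': '1', 'I': '1', 'i': '1',
--         'S': '5', 's': '5',
--         'B': '8',
--         'Z': '2', 'z': '2',
--         'g': '9', 'q': '9',
--         'D': '0',
--     }
--
--     result = text
--     for letter, digit in corrections.items():
--         result = result.replace(letter, digit)
--
--     return result
-- ===== SOURCE B (Python) =====
-- def fix_ocr_number_errors(text: str) -> str:
--     """Classify each character with an if/elif chain of small membership tests,
--     appending the corrected character to an output buffer in one pass."""
--     out = []
--     for c in text:
--         if c in 'OoD':
--             out.append('0')
--         elif c in 'lIi':
--             out.append('1')
--         elif c in 'Ss':
--             out.append('5')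
--         elif c == 'B':
--             out.append('8')
--         elif c in 'Zz':
--             out.append('2')
--         elif c in 'gq':
--             out.append('9')
--         else:
--             out.append(c)
--     return ''.join(out)
-- ===== Notes on version B (the rewrite author's own statement) =====
-- stated objective: simpler
-- what changed: Replaces 13 sequential whole-string .replace() passes (one per table entry) with a single left-to-right pass that classifies each character by an if/elif chain of membership tests and appends the corrected character to an output buffer; the corrections table disappears entirely.
import Mathlib
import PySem

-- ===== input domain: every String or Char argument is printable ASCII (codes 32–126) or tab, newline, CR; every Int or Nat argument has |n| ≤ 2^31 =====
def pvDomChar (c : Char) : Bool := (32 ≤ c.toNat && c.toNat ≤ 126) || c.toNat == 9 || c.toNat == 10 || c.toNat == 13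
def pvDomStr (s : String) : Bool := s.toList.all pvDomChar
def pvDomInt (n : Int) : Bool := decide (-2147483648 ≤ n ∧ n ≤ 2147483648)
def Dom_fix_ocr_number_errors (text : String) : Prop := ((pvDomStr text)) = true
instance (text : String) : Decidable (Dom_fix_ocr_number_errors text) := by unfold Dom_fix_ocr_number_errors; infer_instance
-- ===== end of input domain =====

-- B replaces A's 13 sequential whole-string .replace() passes with one left-to-right pass
-- classifying each character by an if/elif chain and appending to a buffer (objective: simpler).

-- ===== PORT A =====
-- A's corrections dict in insertion order, as iterated by A's for-loop of replace passes
def pvCorrectionsA : List (Char × Char) :=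
  [('O','0'), ('o','0'), ('l','1'), ('I','1'), ('i','1'), ('S','5'), ('s','5'), ('B','8'), ('Z','2'), ('z','2'), ('g','9'), ('q','9'), ('D','0')]

def fix_ocr_number_errors (text : String) : String :=
  pvCorrectionsA.foldl
    (fun result p => PySem.Str.replace result (String.ofList [p.1]) (String.ofList [p.2])) text

-- ===== PORT B =====
-- B's per-character if/elif chain of membership tests (no table)
def pvFixChar (c : Char) : Char :=
  if c = 'O' ∨ c = 'o' ∨ c = 'D' then '0'
  else if c = 'l' ∨ c = 'I' ∨ c = 'i' then '1'
  else if c = 'S' ∨ c = 's' then '5'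
  else if c = 'B' then '8'
  else if c = 'Z' ∨ c = 'z' then '2'
  else if c = 'g' ∨ c = 'q' then '9'
  else c

-- B's for-loop appending corrected characters to the output buffer
def pvFixGo : List Char → List Char
  | [] => []
  | c :: t => pvFixChar c :: pvFixGo t

def fix_ocr_number_errors_alt (text : String) : String :=
  String.ofList (pvFixGo text.toList)

-- ===== PRECONDITION & SPEC =====
def Spec_fix_ocr_number_errors (text : String) (out : String) : Prop := out = fix_ocr_number_errors_alt text
instance (text : String) (out : String) : Decidable (Spec_fix_ocr_number_errors text out) := by unfold Spec_fix_ocr_number_errors; infer_instance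

-- ===== CLAIM =====
def Claim_equal_fix_ocr_number_errors : Prop := ∀ (text : String), Dom_fix_ocr_number_errors text → Spec_fix_ocr_number_errors text (fix_ocr_number_errors text)

-- ===== LEMMAS AND PROOFS =====

-- replacing a single character by a single character scans left to right, one char a step
theorem replace_go_single (a b : Char) :
    ∀ (cs acc : List Char),
      PySem.Chars.replace.go [a] [b] cs.length cs acc
        = acc.reverse ++ cs.map (fun c => if c == a then b else c) := by
  intro cs
  induction cs with
  | nil => intro acc; simp [PySem.Chars.replace.go]
  | cons c t ih =>
    intro acc
    by_cases h : a = c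
    · subst h
      simpa [PySem.Chars.replace.go, List.isPrefixOf] using ih ([b] ++ acc)
    · simp [PySem.Chars.replace.go, List.isPrefixOf, h, Ne.symm h, ih (c :: acc)]

-- so a single-char replace is a map over the characters
theorem replace_single (a b : Char) (cs : List Char) :
    PySem.Chars.replace cs [a] [b] = cs.map (fun c => if c == a then b else c) := by
  simpa [PySem.Chars.replace] using replace_go_single a b cs []

theorem str_replace_single (a b : Char) (s : String) :
    (PySem.Str.replace s (String.ofList [a]) (String.ofList [b])).toList
      = s.toList.map (fun c => if c == a then b else c) := by
  simpa using replace_single a b s.toList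

-- A's whole chain of replace passes, viewed on the character list, is one map of the
-- per-character composite of the 13 substitutions
theorem foldA_toList (ps : List (Char × Char)) :
    ∀ (s : String),
      (ps.foldl (fun r p => PySem.Str.replace r (String.ofList [p.1]) (String.ofList [p.2])) s).toList
        = s.toList.map (fun c => ps.foldl (fun x p => if x == p.1 then p.2 else x) c) := by
  induction ps with
  | nil => intro s; simp
  | cons p t ih =>
    intro s
    simp only [List.foldl_cons]
    rw [ih, str_replace_single, List.map_map]
    rfl

-- the per-character composite of A's 13 passes equals B's if/elif chain
theorem char_step (c : Char) :
    (pvCorrectionsA.foldl (fun x p => if x == p.1 then p.2 else x) c) = pvFixChar c := by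
  by_cases h1 : c = 'O'
  · subst h1; decide
  by_cases h2 : c = 'o'
  · subst h2; decide
  by_cases h3 : c = 'l'
  · subst h3; decide
  by_cases h4 : c = 'I'
  · subst h4; decide
  by_cases h5 : c = 'i'
  · subst h5; decide
  by_cases h6 : c = 'S'
  · subst h6; decide
  by_cases h7 : c = 's'
  · subst h7; decide
  by_cases h8 : c = 'B'
  · subst h8; decide
  by_cases h9 : c = 'Z'
  · subst h9; decide
  by_cases h10 : c = 'z'
  · subst h10; decide
  by_cases h11 : c = 'g'
  · subst h11; decide
  by_cases h12 : c = 'q'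
  · subst h12; decide
  by_cases h13 : c = 'D'
  · subst h13; decide
  simp [pvCorrectionsA, pvFixChar, h1, h2, h3, h4, h5, h6, h7, h8, h9, h10, h11, h12, h13,
    show (c=='O')=false from by simp [h1],
    show (c=='o')=false from by simp [h2],
    show (c=='l')=false from by simp [h3],
    show (c=='I')=false from by simp [h4],
    show (c=='i')=false from by simp [h5],
    show (c=='S')=false from by simp [h6],
    show (c=='s')=false from by simp [h7],
    show (c=='B')=false from by simp [h8],
    show (c=='Z')=false from by simp [h9],
    show (c=='z')=false from by simp [h10],
    show (c=='g')=false from by simp [h11],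
    show (c=='q')=false from by simp [h12],
    show (c=='D')=false from by simp [h13]]

-- B's loop is the map of its per-character chain
theorem fixGo_eq_map (cs : List Char) : pvFixGo cs = cs.map pvFixChar := by
  induction cs with
  | nil => rfl
  | cons c t ih => simp [pvFixGo, ih]

-- ===== VERDICT =====
theorem fix_ocr_number_errors_spec : Claim_equal_fix_ocr_number_errors := by
  intro text _
  unfold Spec_fix_ocr_number_errors fix_ocr_number_errors fix_ocr_number_errors_alt
  have h : (pvCorrectionsA.foldl (fun r p => PySem.Str.replace r (String.ofList [p.1]) (String.ofList [p.2])) text).toList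
      = pvFixGo text.toList := by
    rw [foldA_toList, fixGo_eq_map]
    exact List.map_congr_left (fun c _ => char_step c)
  calc pvCorrectionsA.foldl (fun r p => PySem.Str.replace r (String.ofList [p.1]) (String.ofList [p.2])) text
      = String.ofList (pvCorrectionsA.foldl (fun r p => PySem.Str.replace r (String.ofList [p.1]) (String.ofList [p.2])) text).toList := by simp
    _ = String.ofList (pvFixGo text.toList) := by rw [h]
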